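-- pv_equiv track=rewrite | github.com/gaston-lm/TP1_TD- | peculiar.py | alterna_paridad
-- ===== SOURCE A (Python) =====
-- def es_par (n:int) -> bool:
--     ''' Determina si un numero es par.
--         Pre: n pertenece a los enteros.
--         Post: Devuelve True si n es par y False si es impar.
--     '''
--     vr:bool = n % 2 == 0
--     return vr
--
-- def misma_paridad (n:int, m:int) -> bool:
--     ''' Determina si tienen la misma paridad.
--         Pre: n, m  pertenecen a L (donde L = naturales + 0)
--         Post: vr equivale a que ambos números son pares o ambos impares
--     '''
--     vr:bool = es_par(n) and es_par(m) or not es_par(n) and not es_par(m)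
--     return vr
--
-- def alterna_paridad(n:int) -> bool:
--     ''' Determina si los dígitos de n alternan su paridad.
--         Pre: n pertenece a L (donde L = naturales + 0).
--         Post: vr equivale a que los dígitos de n alternen su paridad.
--     '''
--     i:int = 1
--     string_n:str = str(n)
--     vr:bool = True
--
--     # (A)
--     while i < len(string_n):
--         # (B)
--         vr = vr and not misma_paridad(int(string_n[i-1]),int(string_n[i]))
--         i = i + 1
--         # (C)
--     # (D)
--     return vr
-- ===== SOURCE B (Python) =====
-- def alterna_paridad(n: int) -> bool:
--     s = ''.join(str(int(c) % 2) for c in str(n))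
--     return '00' not in s and '11' not in s
-- ===== Notes on version B (the rewrite author's own statement) =====
-- stated objective: idiomatic
-- what changed: Replaces the index-based while loop with an accumulating boolean and per-pair parity comparison by building the digits' parity string once and answering with two substring-containment tests ('00'/'11' never occur iff parities alternate).
import Mathlib
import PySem

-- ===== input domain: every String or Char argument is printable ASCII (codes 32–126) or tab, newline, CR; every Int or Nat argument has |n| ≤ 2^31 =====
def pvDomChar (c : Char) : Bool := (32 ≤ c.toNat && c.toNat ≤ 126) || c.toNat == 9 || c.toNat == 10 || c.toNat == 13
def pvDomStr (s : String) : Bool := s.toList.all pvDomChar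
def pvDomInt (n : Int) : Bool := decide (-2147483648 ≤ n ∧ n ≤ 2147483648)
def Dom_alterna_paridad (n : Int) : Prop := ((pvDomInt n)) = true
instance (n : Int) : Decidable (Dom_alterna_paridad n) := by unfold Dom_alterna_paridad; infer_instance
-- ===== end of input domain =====

-- B builds the digits' parity string once and answers with two substring tests ('00'/'11' absent
-- iff parities alternate), instead of A's index loop over adjacent pairs; objective: idiomatic.

-- ===== PORT A =====
def es_par (n : Int) : Bool := PySem.Int.mod n 2 == 0

def misma_paridad (n m : Int) : Bool :=
  es_par n && es_par m || !es_par n && !es_par m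

-- int(string_n[j]) for an in-range index j; the `.getD 0` default is reached only where
-- Python's int() raises ValueError (the '-' sign of a negative n), excluded by Pre_.
def digAt (cs : List Char) (j : Nat) : Int :=
  (PySem.Int.ofChars? [cs.getD j ' ']).getD 0

-- the while loop of A: state (i, vr)
def aLoop (cs : List Char) (i : Nat) (vr : Bool) : Bool :=
  if i < cs.length then
    aLoop cs (i + 1) (vr && !misma_paridad (digAt cs (i - 1)) (digAt cs i))
  else vr
termination_by cs.length - i

def alterna_paridad (n : Int) : Bool :=
  aLoop (PySem.Int.toChars n) 1 true

-- ===== PORT B =====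
-- str(int(c) % 2); the `.getD 0` default is reached only where int() raises, excluded by Pre_.
def bitChars (c : Char) : List Char :=
  PySem.Int.toChars (PySem.Int.mod ((PySem.Int.ofChars? [c]).getD 0) 2)

def alterna_paridad_alt (n : Int) : Bool :=
  let s := (PySem.Int.toChars n).flatMap bitChars
  !PySem.Chars.isIn ['0', '0'] s && !PySem.Chars.isIn ['1', '1'] s

-- ===== PRECONDITION & SPEC =====
-- A raises ValueError on negative n (int('-') on the sign character), so those inputs are excluded.
def Pre_alterna_paridad (n : Int) : Prop := 0 ≤ n
instance (n : Int) : Decidable (Pre_alterna_paridad n) := by unfold Pre_alterna_paridad; infer_instance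
def pvWitness_alterna_paridad : Int := (1234)

def Spec_alterna_paridad (n : Int) (out : Bool) : Prop := out = alterna_paridad_alt n
instance (n : Int) (out : Bool) : Decidable (Spec_alterna_paridad n out) := by unfold Spec_alterna_paridad; infer_instance

-- ===== CLAIM (what is proved, stated in full; the proofs are below) =====
def Claim_equal_alterna_paridad : Prop := ∀ (n : Int), Dom_alterna_paridad n → Pre_alterna_paridad n → Spec_alterna_paridad n (alterna_paridad n)

-- ===== LEMMAS AND PROOFS =====

-- proof-side helpers
def digitList : List Char := ['0','1','2','3','4','5','6','7','8','9']

def dv (c : Char) : Int := (PySem.Int.ofChars? [c]).getD 0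

def bit (c : Char) : Char := if c.toNat % 2 == 0 then '0' else '1'

-- adjacent-pair chain, A's flavour
def chainA : List Char → Bool
  | a :: b :: t => !misma_paridad (dv a) (dv b) && chainA (b :: t)
  | _ => true

-- adjacent-pair chain, B's flavour (no equal neighbours)
def chainB : List Char → Bool
  | a :: b :: t => (a != b) && chainB (b :: t)
  | _ => true

theorem chainA_short (cs : List Char) (h : cs.length ≤ 1) : chainA cs = true := by
  match cs, h with
  | [], _ => rfl
  | [a], _ => rfl

theorem digAt_eq_dv (cs : List Char) (j : Nat) (h : j < cs.length) :
    digAt cs j = dv cs[j] := by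
  simp [digAt, dv, List.getD_eq_getElem?_getD, List.getElem?_eq_getElem h]

theorem aLoop_eq_chainA (cs : List Char) (i : Nat) (vr : Bool) (hi : 1 ≤ i) :
    aLoop cs i vr = (vr && chainA (cs.drop (i - 1))) := by
  by_cases h : i < cs.length
  · rw [aLoop]
    simp only [if_pos h]
    rw [aLoop_eq_chainA cs (i + 1) _ (by omega)]
    have h1 : i - 1 < cs.length := by omega
    have e2 : cs.drop i = cs[i] :: cs.drop (i + 1) := List.drop_eq_getElem_cons h
    have e1 : cs.drop (i - 1) = cs[i - 1] :: cs.drop i := by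
      have e := List.drop_eq_getElem_cons h1
      rwa [show i - 1 + 1 = i from by omega] at e
    rw [e1, e2, chainA, ← e2, digAt_eq_dv cs (i - 1) h1, digAt_eq_dv cs i h,
        Nat.add_sub_cancel, Bool.and_assoc]
  · rw [aLoop]
    simp only [if_neg h]
    rw [chainA_short (cs.drop (i - 1)) (by simp only [List.length_drop]; omega), Bool.and_true]
termination_by cs.length - i

theorem digitChar_mem (m : Nat) (h : m < 10) : Nat.digitChar m ∈ digitList := by
  interval_cases m <;> decide

theorem toDigitsCore_digits (fuel n : Nat) (ds : List Char)
    (hds : ∀ c ∈ ds, c ∈ digitList) :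
    ∀ c ∈ Nat.toDigitsCore 10 fuel n ds, c ∈ digitList := by
  induction fuel generalizing n ds with
  | zero => simpa [Nat.toDigitsCore] using hds
  | succ f ih =>
    have hd : ∀ c ∈ (n % 10).digitChar :: ds, c ∈ digitList := by
      intro c hc
      rcases List.mem_cons.mp hc with h | h
      · exact h ▸ digitChar_mem _ (Nat.mod_lt _ (by norm_num))
      · exact hds c h
    rw [Nat.toDigitsCore]
    split
    · exact hd
    · exact ih _ _ hd

theorem toChars_digits (n : Int) (h : 0 ≤ n) :
    ∀ c ∈ (PySem.Int.toChars n), c ∈ digitList := by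
  have hnn : ¬ n < 0 := not_lt.mpr h
  simp only [PySem.Int.toChars, if_neg hnn, Nat.toDigits]
  exact toDigitsCore_digits _ _ [] (by simp)

theorem bitChars_eq (c : Char) (h : c ∈ digitList) : bitChars c = [bit c] := by
  fin_cases h <;> decide

theorem pair_infix_cons (a b x y : Char) (t : List Char) :
    [a, b] <:+: (x :: y :: t) ↔ (x = a ∧ y = b) ∨ [a, b] <:+: (y :: t) := by
  rw [List.infix_cons_iff]
  constructor
  · rintro (h | h)
    · rcases List.cons_prefix_cons.mp h with ⟨rfl, h2⟩
      rcases List.cons_prefix_cons.mp h2 with ⟨rfl, -⟩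
      exact Or.inl ⟨rfl, rfl⟩
    · exact Or.inr h
  · rintro (⟨rfl, rfl⟩ | h)
    · exact Or.inl (List.cons_prefix_cons.mpr ⟨rfl, List.cons_prefix_cons.mpr ⟨rfl, List.nil_prefix⟩⟩)
    · exact Or.inr h

theorem noPair_eq_chainB (s : List Char) (hb : ∀ c ∈ s, c = '0' ∨ c = '1') :
    (!PySem.Chars.isIn ['0', '0'] s && !PySem.Chars.isIn ['1', '1'] s) = chainB s := by
  have key : ∀ s : List Char, (∀ c ∈ s, c = '0' ∨ c = '1') →
      ((¬ (['0', '0'] <:+: s) ∧ ¬ (['1', '1'] <:+: s)) ↔ chainB s = true) := by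
    intro s
    induction s using chainB.induct with
    | case1 x y t ih =>
      intro hbs
      have ih' := ih (fun c hc => hbs c (List.mem_cons_of_mem _ hc))
      rw [pair_infix_cons, pair_infix_cons, chainB]
      rcases hbs x (by simp) with rfl | rfl <;>
        rcases hbs y (by simp) with rfl | rfl <;>
          simp [ih']
    | case2 t ht =>
      intro _
      match t, ht with
      | [], _ => simp [chainB]
      | [x], _ =>
        have h1 : ¬ (['0', '0'] <:+: [x]) := fun h => by simpa using h.length_le
        have h2 : ¬ (['1', '1'] <:+: [x]) := fun h => by simpa using h.length_le
        simp [chainB, h1, h2]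
      | a :: b :: t2, ht => exact absurd rfl (ht a b t2)
  have e := key s hb
  cases h00 : PySem.Chars.isIn ['0', '0'] s <;> cases h11 : PySem.Chars.isIn ['1', '1'] s
  · exact (e.mp ⟨(PySem.Chars.isIn_eq_false_iff _ _).mp h00,
      (PySem.Chars.isIn_eq_false_iff _ _).mp h11⟩).symm
  all_goals
    simp only [Bool.not_true, Bool.not_false, Bool.and_false, Bool.false_and]
    cases hcb : chainB s with
    | false => rfl
    | true =>
      rcases e.mpr hcb with ⟨n0, n1⟩
      rw [(PySem.Chars.isIn_eq_false_iff _ _).mpr n0] at h00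
      rw [(PySem.Chars.isIn_eq_false_iff _ _).mpr n1] at h11
      simp at h00 h11

theorem pair_parity (a b : Char) (ha : a ∈ digitList) (hb : b ∈ digitList) :
    (!misma_paridad (dv a) (dv b)) = (bit a != bit b) := by
  fin_cases ha <;> fin_cases hb <;> decide

theorem chainA_eq_chainB (cs : List Char) (hd : ∀ c ∈ cs, c ∈ digitList) :
    chainA cs = chainB (cs.map bit) := by
  induction cs using chainA.induct with
  | case1 a b t ih =>
    rw [chainA, List.map_cons, List.map_cons, chainB, ← List.map_cons,
        ih (fun c hc => hd c (List.mem_cons_of_mem _ hc)),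
        pair_parity a b (hd a (by simp)) (hd b (by simp))]
  | case2 t ht =>
    match t, ht with
    | [], _ => rfl
    | [x], _ => rfl
    | a :: b :: t2, ht => exact absurd rfl (ht a b t2)

theorem flatMap_bitChars (cs : List Char) (hd : ∀ c ∈ cs, c ∈ digitList) :
    cs.flatMap bitChars = cs.map bit := by
  induction cs with
  | nil => rfl
  | cons a t ih =>
    simp only [List.flatMap_cons, List.map_cons]
    rw [bitChars_eq a (hd a (by simp)), ih (fun c hc => hd c (by simp [hc]))]
    rfl

-- ===== VERDICT (by name: the statement is the Claim_ definition above) =====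
theorem alterna_paridad_spec : Claim_equal_alterna_paridad := by
  intro n _ hpre
  unfold Spec_alterna_paridad alterna_paridad alterna_paridad_alt
  have hd := toChars_digits n hpre
  set cs := (PySem.Int.toChars n) with hcs
  have h1 : aLoop cs 1 true = chainA cs := by
    simpa using aLoop_eq_chainA cs 1 true (le_refl 1)
  have h2 : cs.flatMap bitChars = cs.map bit := flatMap_bitChars cs hd
  rw [h1, h2, noPair_eq_chainB, chainA_eq_chainB cs hd]
  intro c hc
  rcases List.mem_map.mp hc with ⟨d, _, rfl⟩
  by_cases h : d.toNat % 2 == 0 <;> simp [bit, h]
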